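-- pv_equiv track=rewrite | github.com/AlxndrJhn/adventofcode2023 | 10/day.py | vertical_changes
-- ===== SOURCE A (Python) =====
-- h = "-"
--
-- v = "|"
--
-- L = "L"
--
-- J = "J"
--
-- _7 = "7"
--
-- F = "F"
--
-- def vertical_changes(cells, vals):
--     cells_used = [cells[i] for i in range(len(cells)) if vals[i] > -1]
--     cells_str = "".join(cells_used)
--     cells_str = cells_str.replace(h, "")
--     count_changes = 0
--     vert_changes = [v, F + J, L + _7]
--     for vert in vert_changes:
--         count_changes += cells_str.count(vert)
--     return count_changes
-- ===== SOURCE B (Python) =====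
-- def vertical_changes(cells, vals):
--     count = 0
--     prev = ""
--     for i in range(len(cells)):
--         if vals[i] > -1:
--             for c in cells[i]:
--                 if c == "-":
--                     continue
--                 if c == "|":
--                     count += 1
--                 elif prev == "F" and c == "J":
--                     count += 1
--                 elif prev == "L" and c == "7":
--                     count += 1
--                 prev = c
--     return count
-- ===== Notes on version B (the rewrite author's own statement) =====
-- stated objective: simpler
-- what changed: Replaced the build-list/join/replace/three-str.count pipeline with one fused scan over the kept cells' characters that keeps the previous non-'-' character and counts '|', F->J and L->7 transitions on the fly.
import Mathlib
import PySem

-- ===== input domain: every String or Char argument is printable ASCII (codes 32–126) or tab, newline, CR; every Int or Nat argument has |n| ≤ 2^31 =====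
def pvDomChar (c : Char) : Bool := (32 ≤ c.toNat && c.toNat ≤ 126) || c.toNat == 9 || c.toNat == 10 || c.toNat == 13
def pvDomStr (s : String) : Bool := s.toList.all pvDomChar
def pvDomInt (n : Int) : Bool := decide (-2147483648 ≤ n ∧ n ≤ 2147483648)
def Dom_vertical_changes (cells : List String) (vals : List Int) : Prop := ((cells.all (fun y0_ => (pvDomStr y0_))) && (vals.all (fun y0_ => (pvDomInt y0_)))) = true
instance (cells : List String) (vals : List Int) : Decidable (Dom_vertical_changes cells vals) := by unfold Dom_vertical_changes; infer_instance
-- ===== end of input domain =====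

-- B fuses A's build-list/join/replace/three-count pipeline into one scan keeping the previous kept character.


-- ===== PORT A =====
-- literal port of A: comprehension over range, join, replace('-',''), sum of three str.count
def vertical_changes (cells : List String) (vals : List Int) : Int :=
  let cells_used : List String :=
    ((List.range cells.length).filter (fun i => vals.getD i 0 > -1)).map (fun i => cells.getD i "")
  let cells_str : List Char := PySem.Chars.join [] (cells_used.map String.toList)
  let cells_str : List Char := PySem.Chars.replace cells_str ['-'] []
  let vert_changes : List (List Char) := [['|'], ['F', 'J'], ['L', '7']]
  vert_changes.foldl (fun acc vert => acc + (PySem.Chars.count cells_str vert : Int)) 0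

-- ===== PORT B =====
-- one step of B's inner loop: skip '-', count, remember the char
def vcStep (st : Int × Option Char) (c : Char) : Int × Option Char :=
  if c = '-' then st
  else
    let cnt :=
      if c = '|' then st.1 + 1
      else if st.2 = some 'F' ∧ c = 'J' then st.1 + 1
      else if st.2 = some 'L' ∧ c = '7' then st.1 + 1
      else st.1
    (cnt, some c)

def vertical_changes_alt (cells : List String) (vals : List Int) : Int :=
  ((List.range cells.length).foldl
    (fun st i => if vals.getD i 0 > -1 then (cells.getD i "").toList.foldl vcStep st else st)
    ((0 : Int), (none : Option Char))).1

-- ===== PRECONDITION & SPEC =====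
-- A (and B) index vals[i] for every i < len(cells): IndexError (excluded) iff vals is shorter than cells.
def Pre_vertical_changes (cells : List String) (vals : List Int) : Prop :=
  cells.length ≤ vals.length
instance (cells : List String) (vals : List Int) : Decidable (Pre_vertical_changes cells vals) := by
  unfold Pre_vertical_changes; infer_instance

def pvWitness_vertical_changes : List String × List Int := (["F", "J-", "|", "L7"], [0, -5, 1, 2])

def Spec_vertical_changes (cells : List String) (vals : List Int) (out : Int) : Prop := out = vertical_changes_alt cells vals
instance (cells : List String) (vals : List Int) (out : Int) : Decidable (Spec_vertical_changes cells vals out) := by unfold Spec_vertical_changes; infer_instance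

-- ===== CLAIM (what is proved, stated in full; the proofs are below) =====
def Claim_equal_vertical_changes : Prop := ∀ (cells : List String) (vals : List Int), Dom_vertical_changes cells vals → Pre_vertical_changes cells vals → Spec_vertical_changes cells vals (vertical_changes cells vals)

-- ===== LEMMAS AND PROOFS =====

-- adjacent-pair count of the pattern [a, b] inside a list
def pair2 (a b : Char) : List Char → Nat
  | x :: y :: t => (if x = a ∧ y = b then 1 else 0) + pair2 a b (y :: t)
  | _ => 0

-- the prev-state after scanning a list (last non-'-' char, here lists are pre-filtered)
def lastOr (prev : Option Char) : List Char → Option Char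
  | [] => prev
  | c :: t => lastOr (some c) t

-- boundary-aware pair count used to characterise B's scan state
def pairP (prev : Option Char) : List Char → Nat
  | [] => 0
  | c :: t =>
      (if (prev = some 'F' ∧ c = 'J') ∨ (prev = some 'L' ∧ c = '7') then 1 else 0) + pairP (some c) t

theorem replace_go_dash (fuel : Nat) :
    ∀ (l acc : List Char), l.length ≤ fuel →
      PySem.Chars.replace.go ['-'] [] fuel l acc = acc.reverse ++ l.filter (· ≠ '-') := by
  induction fuel with
  | zero => intro l acc h; cases l with
    | nil => simp [PySem.Chars.replace.go]
    | cons c t => simp at h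
  | succ f ih =>
    intro l acc h
    cases l with
    | nil => simp [PySem.Chars.replace.go]
    | cons c t =>
      simp only [PySem.Chars.replace.go]
      by_cases hc : c = '-'
      · subst hc
        have hp : List.isPrefixOf ['-'] ('-' :: t) = true := by simp [List.isPrefixOf]
        rw [if_pos hp]
        simp only [List.length_cons] at h
        rw [ih _ _ (by simpa using Nat.le_of_succ_le_succ h)]
        simp
      · have hp : List.isPrefixOf ['-'] (c :: t) = false := by
          simp only [List.isPrefixOf, Bool.and_eq_false_iff]
          left
          simp only [beq_eq_false_iff_ne, ne_eq]
          exact fun h => hc h.symm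
        rw [if_neg (by simp [hp])]
        simp only [List.length_cons] at h
        rw [ih _ _ (Nat.le_of_succ_le_succ h)]
        simp [hc]

theorem replace_dash (s : List Char) :
    PySem.Chars.replace s ['-'] [] = s.filter (· ≠ '-') := by
  simp only [PySem.Chars.replace, List.isEmpty_cons, Bool.false_eq_true, if_false]
  exact replace_go_dash s.length s [] le_rfl

theorem count_go_single (c : Char) (fuel : Nat) :
    ∀ (l : List Char) (acc : Nat), l.length ≤ fuel →
      PySem.Chars.count.go [c] fuel l acc = acc + l.count c := by
  induction fuel with
  | zero => intro l acc h; cases l with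
    | nil => simp [PySem.Chars.count.go]
    | cons x t => simp at h
  | succ f ih =>
    intro l acc h
    cases l with
    | nil => simp [PySem.Chars.count.go]
    | cons x t =>
      simp only [PySem.Chars.count.go]
      simp only [List.length_cons] at h
      by_cases hx : x = c
      · subst hx
        have hp : List.isPrefixOf [x] (x :: t) = true := by simp [List.isPrefixOf]
        rw [if_pos hp]
        rw [ih _ _ (by simpa using Nat.le_of_succ_le_succ h)]
        simp only [List.length_cons, List.length_nil, List.drop_succ_cons, List.drop_zero,
          List.count_cons, BEq.rfl, if_pos]
        omega
      · have hp : List.isPrefixOf [c] (x :: t) = false := by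
          simp [List.isPrefixOf]; exact fun h' => hx h'.symm
        rw [if_neg (by simp [hp])]
        rw [ih _ _ (Nat.le_of_succ_le_succ h)]
        simp [hx]

theorem count_single (s : List Char) (c : Char) :
    PySem.Chars.count s [c] = s.count c := by
  simp only [PySem.Chars.count, List.isEmpty_cons, Bool.false_eq_true, if_false]
  have := count_go_single c s.length s 0 le_rfl
  omega

theorem pair2_cons_ne (a b : Char) (hab : a ≠ b) (t : List Char) :
    pair2 a b (b :: t) = pair2 a b t := by
  cases t with
  | nil => simp [pair2]
  | cons y u =>
    simp only [pair2]
    have hne : ¬ (b = a ∧ y = b) := fun h => hab h.1.symm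
    simp [hne]

theorem count_go_pair (a b : Char) (hab : a ≠ b) (fuel : Nat) :
    ∀ (l : List Char) (acc : Nat), l.length ≤ fuel →
      PySem.Chars.count.go [a, b] fuel l acc = acc + pair2 a b l := by
  induction fuel with
  | zero => intro l acc h; cases l with
    | nil => simp [PySem.Chars.count.go, pair2]
    | cons x t => simp at h
  | succ f ih =>
    intro l acc h
    cases l with
    | nil => simp [PySem.Chars.count.go, pair2]
    | cons x t =>
      simp only [PySem.Chars.count.go]
      simp only [List.length_cons] at h
      by_cases hp : List.isPrefixOf [a, b] (x :: t) = true
      · rw [if_pos hp]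
        cases t with
        | nil => simp [List.isPrefixOf] at hp
        | cons y u =>
          simp [List.isPrefixOf] at hp
          obtain ⟨hxa, hyb⟩ := hp
          subst hxa; subst hyb
          rw [ih _ _ (by simp at h ⊢; omega)]
          have h2 : pair2 a b (a :: b :: u) = 1 + pair2 a b u := by
            rw [show pair2 a b (a :: b :: u) = (if a = a ∧ b = b then 1 else 0) + pair2 a b (b :: u) from rfl]
            rw [pair2_cons_ne a b hab]
            simp
          simp only [List.length_cons, List.length_nil, List.drop_succ_cons, List.drop_zero]
          omega
      · rw [if_neg hp]
        rw [ih _ _ (Nat.le_of_succ_le_succ h)]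
        have hx : pair2 a b (x :: t) = pair2 a b t := by
          cases t with
          | nil => simp [pair2]
          | cons y u =>
            simp only [pair2]
            have hnot : ¬ (x = a ∧ y = b) := by
              rintro ⟨rfl, rfl⟩
              simp [List.isPrefixOf] at hp
            simp [hnot]
        rw [hx]
  
theorem count_pair (s : List Char) (a b : Char) (hab : a ≠ b) :
    PySem.Chars.count s [a, b] = pair2 a b s := by
  simp only [PySem.Chars.count, List.isEmpty_cons, Bool.false_eq_true, if_false]
  have := count_go_pair a b hab s.length s 0 le_rfl
  omega

-- B's inner fold, with the '-' guard fused in, equals the fold over the '-'-filtered list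
theorem foldl_vcStep_filter (l : List Char) :
    ∀ st : Int × Option Char,
      l.foldl vcStep st = (l.filter (· ≠ '-')).foldl vcStep st := by
  induction l with
  | nil => intro st; rfl
  | cons c t ih =>
    intro st
    by_cases hc : c = '-'
    · subst hc; simp [vcStep, ih]
    · simp [hc, List.foldl_cons, ih]

-- characterisation of B's scan on a '-'-free list
theorem foldl_vcStep_char (l : List Char) (hl : ∀ c ∈ l, c ≠ '-') :
    ∀ (cnt : Int) (prev : Option Char),
      l.foldl vcStep (cnt, prev)
        = (cnt + l.count '|' + pairP prev l, lastOr prev l) := by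
  induction l with
  | nil => intro cnt prev; simp [pairP, lastOr]
  | cons c t ih =>
    intro cnt prev
    have hc : c ≠ '-' := hl c (by simp)
    have ht : ∀ x ∈ t, x ≠ '-' := fun x hx => hl x (by simp [hx])
    simp only [List.foldl_cons]
    rw [show vcStep (cnt, prev) c =
      (cnt + (if c = '|' then 1 else 0)
        + (if (prev = some 'F' ∧ c = 'J') ∨ (prev = some 'L' ∧ c = '7') then 1 else 0), some c) by
      simp only [vcStep, if_neg hc]
      by_cases h1 : c = '|'
      · subst h1; simp
      · simp only [if_neg h1]
        by_cases h2 : prev = some 'F' ∧ c = 'J'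
        · have : ¬ (prev = some 'L' ∧ c = '7') := by
            rintro ⟨-, h7⟩; exact absurd (h2.2 ▸ h7) (by decide)
          simp [h2]
        · by_cases h3 : prev = some 'L' ∧ c = '7'
          · simp [h3]
          · simp [h2, h3]]
    rw [ih ht]
    have hcount : ((c :: t).count '|' : Int) = (t.count '|' : Int) + (if c = '|' then 1 else 0) := by
      rcases eq_or_ne c '|' with h | h <;> simp [h]
    have hpair : (pairP prev (c :: t) : Int) =
        (if (prev = some 'F' ∧ c = 'J') ∨ (prev = some 'L' ∧ c = '7') then (1:Int) else 0)
          + (pairP (some c) t : Int) := by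
      rw [show pairP prev (c :: t)
          = (if (prev = some 'F' ∧ c = 'J') ∨ (prev = some 'L' ∧ c = '7') then 1 else 0)
            + pairP (some c) t from rfl]
      push_cast
      split_ifs <;> ring
    refine Prod.ext ?_ ?_
    · simp only []
      rw [hcount, hpair]; ring
    · simp [lastOr]

theorem pairP_some (s : List Char) :
    ∀ c : Char, pairP (some c) s = pair2 'F' 'J' (c :: s) + pair2 'L' '7' (c :: s) := by
  induction s with
  | nil => intro c; simp [pairP, pair2]
  | cons d t ih =>
    intro c
    rw [show pairP (some c) (d :: t)
        = (if (some c = some 'F' ∧ d = 'J') ∨ (some c = some 'L' ∧ d = '7') then 1 else 0)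
          + pairP (some d) t from rfl, ih d]
    rw [show pair2 'F' 'J' (c :: d :: t) = (if c = 'F' ∧ d = 'J' then 1 else 0) + pair2 'F' 'J' (d :: t) from rfl]
    rw [show pair2 'L' '7' (c :: d :: t) = (if c = 'L' ∧ d = '7' then 1 else 0) + pair2 'L' '7' (d :: t) from rfl]
    have : (if (some c = some 'F' ∧ d = 'J') ∨ (some c = some 'L' ∧ d = '7') then 1 else 0)
        = (if c = 'F' ∧ d = 'J' then 1 else 0) + (if c = 'L' ∧ d = '7' then (1:Nat) else 0) := by
      by_cases h1 : c = 'F' ∧ d = 'J'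
      · have h2 : ¬ (c = 'L' ∧ d = '7') := by rintro ⟨hL, -⟩; exact absurd (h1.1 ▸ hL) (by decide)
        simp [h1, h2]
      · by_cases h2 : c = 'L' ∧ d = '7'
        · have h3 : ¬ (c = 'F' ∧ d = 'J') := by rintro ⟨hF, -⟩; exact absurd (h2.1 ▸ hF) (by decide)
          simp [h2, h3]
        · simp [h1, h2]
    omega

theorem pairP_none (s : List Char) :
    pairP none s = pair2 'F' 'J' s + pair2 'L' '7' s := by
  cases s with
  | nil => simp [pairP, pair2]
  | cons c t =>
    rw [show pairP none (c :: t) = (if False ∨ False then 1 else 0) + pairP (some c) t by simp [pairP]]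
    rw [pairP_some t c]
    simp

-- the guarded fold over indices equals one fold over the concatenation of the kept cells' chars
theorem foldl_guard_flatten {ι : Type} (g : (Int × Option Char) → Char → Int × Option Char)
    (p : ι → Bool) (f : ι → List Char) (l : List ι) :
    ∀ st, l.foldl (fun st i => if p i then (f i).foldl g st else st) st
      = (((l.filter (fun i => p i)).map f).flatten).foldl g st := by
  induction l with
  | nil => intro st; rfl
  | cons i t ih =>
    intro st
    by_cases hp : p i
    · simp [hp, List.foldl_cons, ih, List.foldl_append]
    · simp [hp, List.foldl_cons, ih]

theorem flatten_intersperse_nil {α : Type} (l : List (List α)) :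
    (List.intersperse [] l).flatten = l.flatten := by
  induction l with
  | nil => rfl
  | cons x t ih =>
    cases t with
    | nil => rfl
    | cons y u =>
      rw [show List.intersperse ([] : List α) (x :: y :: u) = x :: [] :: List.intersperse [] (y :: u) from rfl]
      simp only [List.flatten_cons] at *
      simp [ih]

-- ===== VERDICT (by name: the statement is the Claim_ definition above) =====
theorem vertical_changes_spec : Claim_equal_vertical_changes := by
  intro cells vals _ _
  unfold Spec_vertical_changes vertical_changes vertical_changes_alt
  simp only []
  -- name the shared data
  set kept := ((List.range cells.length).filter (fun i => vals.getD i 0 > -1)).map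
      (fun i => cells.getD i "") with hkept
  -- A's string after join and replace
  have hjoin : PySem.Chars.join [] (kept.map String.toList) = (kept.map String.toList).flatten := by
    simp only [PySem.Chars.join, List.intercalate]
    exact flatten_intersperse_nil _
  set s0 : List Char := (kept.map String.toList).flatten with hs0
  set s : List Char := s0.filter (· ≠ '-') with hs
  have hA : [( ['|'] : List Char), ['F','J'], ['L','7']].foldl
      (fun acc vert => acc + (PySem.Chars.count (PySem.Chars.replace (PySem.Chars.join [] (kept.map String.toList)) ['-'] []) vert : Int)) 0
      = (s.count '|' : Int) + (pair2 'F' 'J' s : Int) + (pair2 'L' '7' s : Int) := by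
    rw [hjoin]
    rw [show PySem.Chars.replace s0 ['-'] [] = s from replace_dash s0]
    simp only [List.foldl_cons, List.foldl_nil]
    rw [count_single s '|', count_pair s 'F' 'J' (by decide), count_pair s 'L' '7' (by decide)]
    ring
  -- B's fold over indices = fold over s0 = fold over s
  have hB : (List.range cells.length).foldl
      (fun st i => if vals.getD i 0 > -1 then (cells.getD i "").toList.foldl vcStep st else st)
      ((0 : Int), (none : Option Char))
      = s.foldl vcStep ((0 : Int), none) := by
    rw [show (fun st i => if vals.getD i 0 > -1 then (cells.getD i "").toList.foldl vcStep st else st)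
        = (fun (st : Int × Option Char) i => if (decide (vals.getD i 0 > -1) : Bool)
            then ((fun j => (cells.getD j "").toList) i).foldl vcStep st else st) by
      funext st i; simp]
    rw [foldl_guard_flatten vcStep (fun i => decide (vals.getD i 0 > -1)) (fun j => (cells.getD j "").toList)]
    rw [foldl_vcStep_filter]
    congr 1
    rw [hs, hs0, hkept]
    simp only [List.filter_flatten, List.map_map]
    rfl
  rw [hB]
  rw [foldl_vcStep_filter] at hB ⊢
  have hsfree : ∀ c ∈ s.filter (· ≠ '-'), c ≠ '-' := by
    intro c hc; simpa using (List.of_mem_filter hc)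
  rw [foldl_vcStep_char (s.filter (· ≠ '-')) hsfree 0 none]
  have hss : s.filter (· ≠ '-') = s := by
    rw [hs]; simp [List.filter_filter]
  rw [hA]
  simp only [hss]
  rw [pairP_none]
  push_cast
  ring
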